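-- pv_equiv track=rewrite | github.com/benggi06/PythonProject | 포커게임/Ranking.py | is2Pair
-- ===== SOURCE A (Python) =====
-- def is2Pair(cardList):
--     numList=[]
--     countList=[]
--     for i,card in enumerate(cardList):
--         numList.append(card['value'])
--
--     for i in numList:
--         countList.append(numList.count(i))
--
--     if countList.count(2) == 4:
--         return True
--
--     else:
--         return
-- ===== SOURCE B (Python) =====
-- def is2Pair(cardList):
--     values = [card['value'] for card in cardList]
--     pairs = 0
--     rest = values
--     while rest:
--         v = rest[0]
--         same = [x for x in rest if x == v]
--         rest = [x for x in rest if x != v]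
--         if len(same) == 2:
--             pairs += 1
--     if pairs == 2:
--         return True
-- ===== Notes on version B (the rewrite author's own statement) =====
-- stated objective: alternative
-- what changed: Replaces A's per-position numList.count scan over all positions by a partition-recursion: repeatedly split off all copies of the first remaining value and count a pair per distinct value seen exactly twice, returning True iff two such groups exist.
import Mathlib
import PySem

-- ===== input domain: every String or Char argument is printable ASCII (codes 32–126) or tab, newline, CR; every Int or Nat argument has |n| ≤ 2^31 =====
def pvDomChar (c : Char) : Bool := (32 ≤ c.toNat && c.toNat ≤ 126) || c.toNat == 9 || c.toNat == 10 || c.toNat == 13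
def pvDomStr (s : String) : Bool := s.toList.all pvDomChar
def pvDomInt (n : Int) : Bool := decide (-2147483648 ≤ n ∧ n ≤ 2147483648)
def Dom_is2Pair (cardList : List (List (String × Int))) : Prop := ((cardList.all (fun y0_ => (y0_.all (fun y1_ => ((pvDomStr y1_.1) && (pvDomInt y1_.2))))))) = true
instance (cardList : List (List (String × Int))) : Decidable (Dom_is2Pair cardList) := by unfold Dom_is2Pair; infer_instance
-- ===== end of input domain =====

-- B replaces A's per-position count scan by a partition-recursion that strips all copies
-- of the first remaining value each round and counts the groups of size exactly 2
-- (an alternative algorithm of similar cost; return value equivalence is proved).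


-- ===== PORT A =====
-- numList is built card by card; card['value'] raises KeyError when absent (get? = none), excluded by Pre_.
def is2Pair (cardList : List (List (String × Int))) : Option Bool :=
  match cardList.mapM (fun card => PySem.Dict.get? (PySem.Dict.mk card) "value") with
  | none => none
  | some numList =>
    let countList : List Int := numList.map (fun i => (PySem.List.count numList i : Int))
    if PySem.List.count countList 2 = 4 then some true else none

-- ===== PORT B =====
-- the while loop of Source B: split the current list into the copies of its head value and
-- the rest; bump the pair counter when the group has exactly two members.
def pairLoop (rest : List Int) (pairs : Int) : Int :=
  match rest with
  | [] => pairs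
  | v :: t =>
    let same := (v :: t).filter (fun x => x == v)
    let rest' := (v :: t).filter (fun x => x != v)
    pairLoop rest' (if same.length = 2 then pairs + 1 else pairs)
termination_by rest.length
decreasing_by
  simp only [List.filter_cons, bne_self_eq_false, List.length_cons]
  exact Nat.lt_succ_of_le (List.length_filter_le _ _)

def is2Pair_alt (cardList : List (List (String × Int))) : Option Bool :=
  match cardList.mapM (fun card => PySem.Dict.get? (PySem.Dict.mk card) "value") with
  | none => none
  | some values =>
    if pairLoop values 0 = 2 then some true else none

-- ===== PRECONDITION & SPEC =====
-- Pre_ excludes cards missing the 'value' key, on which the Python A raises KeyError.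
def Pre_is2Pair (cardList : List (List (String × Int))) : Prop :=
  ∀ card ∈ cardList, "value" ∈ card.map Prod.fst
instance (cardList : List (List (String × Int))) : Decidable (Pre_is2Pair cardList) := by unfold Pre_is2Pair; infer_instance
def pvWitness_is2Pair : (List (List (String × Int))) :=
  [[("value", 7)], [("value", 7)], [("value", 3)], [("value", 3)], [("value", 9)]]
def Spec_is2Pair (cardList : List (List (String × Int))) (out : Option Bool) : Prop := out = is2Pair_alt cardList
instance (cardList : List (List (String × Int))) (out : Option Bool) : Decidable (Spec_is2Pair cardList out) := by unfold Spec_is2Pair; infer_instance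

-- ===== CLAIM (what is proved, stated in full; the proofs are below) =====
def Claim_equal_is2Pair : Prop := ∀ (cardList : List (List (String × Int))), Dom_is2Pair cardList → Pre_is2Pair cardList → Spec_is2Pair cardList (is2Pair cardList)

-- ===== LEMMAS AND PROOFS =====

lemma cast_beq_two (n : Nat) : (((n : Int)) == 2) = (n == 2) := by
  rcases Decidable.em (n = 2) with h | h
  · subst h; rfl
  · have h2 : ((n : Int)) ≠ 2 := by omega
    simp [h, h2]

-- A's branch condition: the number of positions whose value occurs exactly twice is
-- twice the number of distinct values occurring exactly twice.
lemma countP_count_two (vs : List Int) :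
    vs.countP (fun i => vs.count i == 2) =
      2 * (vs.toFinset.filter (fun a => vs.count a = 2)).card := by
  classical
  set p : Int → Bool := fun i => vs.count i == 2 with hp
  have hL : vs.countP p = (vs.filter p).length := by
    simp [List.countP_eq_length_filter]
  have hsum : (vs.filter p).length = ∑ a ∈ (vs.filter p).toFinset, (vs.filter p).count a :=
    (List.sum_toFinset_count_eq_length _).symm
  have htf : (vs.filter p).toFinset = vs.toFinset.filter (fun a => p a) := by
    simp [List.toFinset_filter]
  have hcount : ∀ a ∈ vs.toFinset.filter (fun a => p a), (vs.filter p).count a = 2 := by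
    intro a ha
    rcases Finset.mem_filter.mp ha with ⟨-, hpa⟩
    rw [List.count_filter hpa]
    simpa [hp] using hpa
  have hset : vs.toFinset.filter (fun a => p a) = vs.toFinset.filter (fun a => vs.count a = 2) := by
    apply Finset.filter_congr
    intro a _
    simp [hp]
  rw [hL, hsum, htf, Finset.sum_congr rfl hcount, hset]
  simp [Finset.sum_const, Nat.mul_comm]

-- B's loop computes exactly the number of distinct values occurring twice.
lemma pairLoop_eq (vs : List Int) (p : Int) :
    pairLoop vs p = p + ((vs.toFinset.filter (fun a => vs.count a = 2)).card : Int) := by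
  classical
  induction hn : vs.length using Nat.strong_induction_on generalizing vs p with
  | _ n ih =>
    match vs with
    | [] => simp [pairLoop]
    | v :: t =>
      rw [pairLoop]
      have hrest : (v :: t).filter (fun x => x != v) = t.filter (fun x => x != v) := by
        simp
      have hlen : (t.filter (fun x => x != v)).length < n := by
        subst hn
        exact Nat.lt_succ_of_le (List.length_filter_le _ _)
      have hIH := ih _ hlen (t.filter (fun x => x != v))
        (if ((v :: t).filter (fun x => x == v)).length = 2 then p + 1 else p) rfl
      rw [hrest, hIH]
      -- relate the filtered list's statistics to the original's
      have hcount' : ∀ a : Int, a ≠ v →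
          (t.filter (fun x => x != v)).count a = (v :: t).count a := by
        intro a ha
        rw [← hrest, List.count_filter (by simp [bne, ha])]
      have hset : (t.filter (fun x => x != v)).toFinset
          = ((v :: t).toFinset.filter (fun a => (v :: t).count a = 2)).erase v ∪
            (((v :: t).toFinset.erase v).filter (fun a => ¬ (v :: t).count a = 2)) := by
        ext a
        by_cases hav : a = v
        · subst hav; simp
        · simp only [List.mem_toFinset, List.mem_filter, Finset.mem_union, Finset.mem_erase,
            Finset.mem_filter, ← hrest]
          constructor
          · rintro ⟨hm, -⟩
            by_cases h2 : (v :: t).count a = 2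
            · exact Or.inl ⟨hav, hm, h2⟩
            · exact Or.inr ⟨⟨hav, hm⟩, h2⟩
          · rintro (⟨-, hm, -⟩ | ⟨⟨-, hm⟩, -⟩) <;> exact ⟨hm, by simp [bne, hav]⟩
      have hfilter : ((t.filter (fun x => x != v)).toFinset).filter
            (fun a => (t.filter (fun x => x != v)).count a = 2)
          = ((v :: t).toFinset.filter (fun a => (v :: t).count a = 2)).erase v := by
        ext a
        by_cases hav : a = v
        · subst hav
          simp [bne]
        · simp only [Finset.mem_filter, Finset.mem_erase, hset, Finset.mem_union,
            Finset.mem_erase, hcount' a hav]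
          constructor
          · rintro ⟨(⟨-, hm, h2⟩ | ⟨⟨-, hm⟩, h2⟩), h2'⟩
            · exact ⟨hav, hm, h2⟩
            · exact absurd h2' h2
          · rintro ⟨-, hm, h2⟩
            exact ⟨Or.inl ⟨hav, hm, h2⟩, h2⟩
      rw [hfilter]
      have hsame : ((v :: t).filter (fun x => x == v)).length = (v :: t).count v := by
        simp [List.count, List.countP_eq_length_filter]
      have hvmem : v ∈ (v :: t).toFinset := by simp
      by_cases h2 : (v :: t).count v = 2
      · have hvS : v ∈ (v :: t).toFinset.filter (fun a => (v :: t).count a = 2) :=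
          Finset.mem_filter.mpr ⟨hvmem, h2⟩
        have hcard := Finset.card_erase_add_one hvS
        rw [if_pos (hsame.trans h2)]
        omega
      · have hvS : v ∉ (v :: t).toFinset.filter (fun a => (v :: t).count a = 2) :=
          fun hc => h2 (Finset.mem_filter.mp hc).2
        rw [Finset.erase_eq_of_notMem hvS, if_neg (fun hc => h2 (hsame.symm.trans hc))]

-- the two branch conditions agree
lemma cond_eq (vs : List Int) :
    (PySem.List.count (vs.map (fun i => (PySem.List.count vs i : Int))) 2 = 4) ↔
      (pairLoop vs 0 = 2) := by
  have hA : PySem.List.count (vs.map (fun i => (PySem.List.count vs i : Int))) 2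
      = vs.countP (fun i => vs.count i == 2) := by
    simp only [PySem.List.count_eq, List.count, List.countP_map, Function.comp_def]
    exact List.countP_congr (fun i _ => by rw [cast_beq_two])
  rw [hA, countP_count_two, pairLoop_eq]
  omega

-- ===== VERDICT (by name: the statement is the Claim_ definition above) =====
theorem is2Pair_spec : Claim_equal_is2Pair := by
  intro cardList _ _
  unfold Spec_is2Pair is2Pair is2Pair_alt
  cases h : cardList.mapM (fun card => PySem.Dict.get? (PySem.Dict.mk card) "value") with
  | none => rfl
  | some vs =>
    simp only
    by_cases hc : PySem.List.count (vs.map (fun i => (PySem.List.count vs i : Int))) 2 = 4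
    · rw [if_pos hc, if_pos ((cond_eq vs).mp hc)]
    · rw [if_neg hc, if_neg (fun hb => hc ((cond_eq vs).mpr hb))]
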